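-- pv_equiv track=rewrite | github.com/lvcorreia/IST-FP-Buggy-Database | projeto1-ist1103528.py | corrigir_palavra
-- ===== SOURCE A (Python) =====
-- def corrigir_palavra(word):
--     length = len(word)
--     count = 0
--     while count < length - 1:
--         letter1 = word[count]
--         letter2 = word[count + 1]
--         # Verificar se a letter1 e letter2 sao um surto de letras
--         if letter1 != letter2 and (letter1.lower() == letter2 or letter1 == letter2.lower()):
--             word = word[:count] + word[count + 2:]
--             length -= 2
--             # E necessario verificar se a letra antes e depois da reacao sao um surto de letras
--             if count != 0:
--                 count -= 1
--         else:
--             count += 1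
--     return word
-- ===== SOURCE B (Python) =====
-- def corrigir_palavra(word):
--     stack = []
--     for c in word:
--         if stack and stack[-1] != c and (stack[-1].lower() == c or stack[-1] == c.lower()):
--             stack.pop()
--         else:
--             stack.append(c)
--     return ''.join(stack)
-- ===== Notes on version B (the rewrite author's own statement) =====
-- stated objective: alternative
-- what changed: Replaced A's while-loop that splices the string and backtracks the index after each removal with a single left-to-right pass over a stack (push each char, pop when it reacts with the top).
import Mathlib
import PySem

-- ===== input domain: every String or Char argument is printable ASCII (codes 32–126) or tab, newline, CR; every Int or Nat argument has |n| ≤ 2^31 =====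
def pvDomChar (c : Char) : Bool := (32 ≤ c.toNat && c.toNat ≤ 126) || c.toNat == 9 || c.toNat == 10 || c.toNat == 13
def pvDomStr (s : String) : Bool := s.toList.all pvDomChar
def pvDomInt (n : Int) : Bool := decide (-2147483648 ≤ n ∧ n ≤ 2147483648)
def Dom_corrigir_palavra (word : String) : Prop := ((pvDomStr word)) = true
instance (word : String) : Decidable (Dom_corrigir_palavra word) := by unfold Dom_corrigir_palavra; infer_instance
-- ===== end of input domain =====

-- B replaces A's backtracking splice-and-rescan loop by a single left-to-right stack pass; same return value.

-- Shared helper: the "surto" test both Pythons write literally: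
-- c1 != c2 and (c1.lower() == c2 or c1 == c2.lower())
def pvSurto (c1 c2 : Char) : Bool :=
  c1 != c2 && (PySem.Chars.lowerChar c1 == c2 || c1 == PySem.Chars.lowerChar c2)

-- ===== PORT A =====
-- A's while loop: `count - 1` on Nat already gives Python's `if count != 0: count -= 1`.
def pvALoop (w : List Char) (count : Nat) : List Char :=
  if h : count + 1 < w.length then
    let letter1 := w[count]
    let letter2 := w[count + 1]
    if pvSurto letter1 letter2 then
      -- word = word[:count] + word[count+2:]; length -= 2; if count != 0: count -= 1
      pvALoop (w.take count ++ w.drop (count + 2)) (count - 1)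
    else
      pvALoop w (count + 1)
  else w
termination_by 2 * w.length - count
decreasing_by
  · simp only [List.length_append, List.length_take, List.length_drop]; omega
  · omega

def corrigir_palavra (word : String) : String := String.ofList (pvALoop word.toList 0)

-- ===== PORT B =====
-- B's stack pass; the stack is kept top-first (cons), joined by a final reverse.
def pvBLoop (stack : List Char) (rest : List Char) : List Char :=
  match rest with
  | [] => stack.reverse
  | c :: cs =>
    match stack with
    | [] => pvBLoop [c] cs
    | t :: ts => if pvSurto t c then pvBLoop ts cs else pvBLoop (c :: t :: ts) cs

def corrigir_palavra_alt (word : String) : String := String.ofList (pvBLoop [] word.toList)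

-- ===== PRECONDITION & SPEC =====
def Spec_corrigir_palavra (word : String) (out : String) : Prop := out = corrigir_palavra_alt word
instance (word : String) (out : String) : Decidable (Spec_corrigir_palavra word out) := by unfold Spec_corrigir_palavra; infer_instance

-- ===== CLAIM (what is proved, stated in full; the proofs are below) =====
def Claim_equal_corrigir_palavra : Prop := ∀ (word : String), Dom_corrigir_palavra word → Spec_corrigir_palavra word (corrigir_palavra word)

-- ===== LEMMAS AND PROOFS =====

theorem pvBLoop_rest_nil (stack : List Char) : pvBLoop stack [] = stack.reverse := rfl

theorem pvBLoop_cons_cons (t c : Char) (ts cs : List Char) :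
    pvBLoop (t :: ts) (c :: cs) =
      if pvSurto t c then pvBLoop ts cs else pvBLoop (c :: t :: ts) cs := rfl

-- Starting the stack machine on an empty stack just pushes the first character.
theorem pvBLoop_nil (xs : List Char) :
    pvBLoop [] xs = pvBLoop (xs.take 1).reverse (xs.drop 1) := by
  cases xs <;> rfl

-- Main invariant: A's loop state (w, count) corresponds to the stack machine that has
-- consumed the first count+1 characters of w and holds them (reversed) as its stack.
theorem pvALoop_eq_pvBLoop (w : List Char) (count : Nat) :
    pvALoop w count = pvBLoop (w.take (count + 1)).reverse (w.drop (count + 1)) := by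
  induction w, count using pvALoop.induct with
  | case1 w count h letter1 letter2 hp ih =>
    rw [pvALoop, dif_pos h, if_pos hp]
    rw [ih]
    have h1 : w.take (count + 1) = w.take count ++ [w[count]] := by
      rw [List.take_add_one]
      simp [List.getElem?_eq_getElem (by omega : count < w.length)]
    have h2 : w.drop (count + 1) = w[count + 1] :: w.drop (count + 2) := by
      exact List.drop_eq_getElem_cons h
    -- unfold one step of the stack machine: top = w[count], head = w[count+1], they react
    conv_rhs => rw [h2, h1]
    rw [List.reverse_append, List.reverse_singleton]
    rw [List.singleton_append, pvBLoop_cons_cons, if_pos hp]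
    cases hc : count with
    | zero =>
      subst hc
      simp only [List.take_zero, List.nil_append, Nat.zero_sub, Nat.zero_add, List.reverse_nil]
      rw [pvBLoop_nil (w.drop 2)]
    | succ k =>
      subst hc
      have hl : (w.take (k+1)).length = k + 1 := by
        rw [List.length_take]; omega
      congr 1
      · congr 1
        rw [Nat.succ_sub_one]
        calc (w.take (k+1) ++ w.drop (k+1+2)).take (k+1)
            = (w.take (k+1) ++ w.drop (k+1+2)).take (w.take (k+1)).length := by rw [hl]
          _ = w.take (k+1) := List.take_left
      · rw [Nat.succ_sub_one]
        calc (w.take (k+1) ++ w.drop (k+1+2)).drop (k+1)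
            = (w.take (k+1) ++ w.drop (k+1+2)).drop (w.take (k+1)).length := by rw [hl]
          _ = w.drop (k+1+2) := List.drop_left
  | case2 w count h letter1 letter2 hp ih =>
    rw [pvALoop, dif_pos h, if_neg hp]
    rw [ih]
    have h1 : w.take (count + 2) = w.take (count + 1) ++ [w[count + 1]] := by
      rw [List.take_add_one]
      simp [List.getElem?_eq_getElem h]
    have h2 : w.drop (count + 1) = w[count + 1] :: w.drop (count + 2) := by
      exact List.drop_eq_getElem_cons h
    have h3 : w.take (count + 1) = w.take count ++ [w[count]] := by
      rw [List.take_add_one]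
      simp [List.getElem?_eq_getElem (by omega : count < w.length)]
    conv_rhs => rw [h2, h3]
    rw [List.reverse_append, List.reverse_singleton, List.singleton_append]
    rw [pvBLoop_cons_cons, if_neg hp]
    congr 1
    rw [show count + 1 + 1 = count + 2 from rfl, h1, h3]
    simp
  | case3 w count h =>
    rw [pvALoop, dif_neg h]
    have : w.take (count + 1) = w ∧ w.drop (count + 1) = [] := by
      constructor
      · exact List.take_of_length_le (by omega)
      · exact List.drop_eq_nil_of_le (by omega)
    rw [this.1, this.2, pvBLoop_rest_nil, List.reverse_reverse]

-- ===== VERDICT (by name: the statement is the Claim_ definition above) =====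
theorem corrigir_palavra_spec : Claim_equal_corrigir_palavra := by
  intro word _
  unfold Spec_corrigir_palavra corrigir_palavra corrigir_palavra_alt
  rw [pvALoop_eq_pvBLoop, pvBLoop_nil word.toList]
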